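-- pv_equiv track=rewrite | github.com/CompOmics/MuMDIA | parsers/parser_parquet.py | replace_mass_shift
-- ===== SOURCE A (Python) =====
-- from typing import Dict, Tuple, Optional, Union
--
-- def replace_mass_shift(
--     peptide: str,
--     replace_dict: Dict[str, str] = {
--         "[+57.0215]": "[Carbamidomethyl]",
--         "[+57.021465]": "[Carbamidomethyl]",
--         "[+15.9949]": "[Oxidation]",
--         "[-18.010565]": "[Glu->pyro-Glu]",
--         "[-17.026548]": "[Gln->pyro-Glu]",
--         "[+0.984016]": "[Deamidated]",
--         "[+14.01565]": "[Methyl]",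
--         "[+27.994915]": "[Formyl]",
--         "[+28.0313]": "[Dimethyl]",
--         "[+79.96633]": "[Phospho]",
--         "[+31.989829]": "[Dioxidation]",
--         "[+31.989828]": "[Dioxidation]",
--         "[+42.010565]": "[Acetyl]",
--         "[+42.010567]": "[Acetyl]",
--         "[+12.0000000]": "[Thiazolidine]",
--         "[+12.000000]": "[Thiazolidine]",
--         "[+12.00000]": "[Thiazolidine]",
--         "[+12.0000]": "[Thiazolidine]",
--         "[+12.000]": "[Thiazolidine]",
--         "[+12.00]": "[Thiazolidine]",
--         "[+12.0]": "[Thiazolidine]",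
--         "[-18.010565]": "[Glu->pyro-Glu]",
--         "[-17.026549]": "[Gln->pyro-Glu]",
--         "[-17.026549]": "[Gln->pyro-Glu]",
--         "[+17.026549]": "[Ammonium]",
--         "[+44.985078]": "[Nitro]",
--         "[+44.985077]": "[Nitro]",
--         "[+43.005814]": "[Carbamyl]",
--         "[+114.042927]": "[GG]",
--         "[+114.04293]": "[GG]",
--         "[+114.03169]": "[Gluratylation]",
--         "[+56.026215]": "[Delta:H(4)C(3)O(1)]",
--         "[+71.03712]": "[Propionamide]",
--     },
-- ) -> str:
--     """
--     Replace mass shift annotations with standardized modification names.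
--
--     Converts numeric mass shift annotations (e.g., [+57.0215]) to readable
--     modification names (e.g., [Carbamidomethyl]) for better interpretability.
--
--     Args:
--         peptide: Peptide sequence string with mass shift annotations
--         replace_dict: Dictionary mapping mass shifts to modification names
--
--     Returns:
--         Peptide sequence with standardized modification names
--     """
--     for k, v in replace_dict.items():
--         peptide = peptide.replace(k, v)
--     return peptide
-- ===== SOURCE B (Python) =====
-- def replace_mass_shift(
--     peptide: str,
--     replace_dict={
--         "[+57.0215]": "[Carbamidomethyl]",
--         "[+57.021465]": "[Carbamidomethyl]",
--         "[+15.9949]": "[Oxidation]",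
--         "[-18.010565]": "[Glu->pyro-Glu]",
--         "[-17.026548]": "[Gln->pyro-Glu]",
--         "[+0.984016]": "[Deamidated]",
--         "[+14.01565]": "[Methyl]",
--         "[+27.994915]": "[Formyl]",
--         "[+28.0313]": "[Dimethyl]",
--         "[+79.96633]": "[Phospho]",
--         "[+31.989829]": "[Dioxidation]",
--         "[+31.989828]": "[Dioxidation]",
--         "[+42.010565]": "[Acetyl]",
--         "[+42.010567]": "[Acetyl]",
--         "[+12.0000000]": "[Thiazolidine]",
--         "[+12.000000]": "[Thiazolidine]",
--         "[+12.00000]": "[Thiazolidine]",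
--         "[+12.0000]": "[Thiazolidine]",
--         "[+12.000]": "[Thiazolidine]",
--         "[+12.00]": "[Thiazolidine]",
--         "[+12.0]": "[Thiazolidine]",
--         "[-18.010565]": "[Glu->pyro-Glu]",
--         "[-17.026549]": "[Gln->pyro-Glu]",
--         "[+17.026549]": "[Ammonium]",
--         "[+44.985078]": "[Nitro]",
--         "[+44.985077]": "[Nitro]",
--         "[+43.005814]": "[Carbamyl]",
--         "[+114.042927]": "[GG]",
--         "[+114.04293]": "[GG]",
--         "[+114.03169]": "[Gluratylation]",
--         "[+56.026215]": "[Delta:H(4)C(3)O(1)]",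
--         "[+71.03712]": "[Propionamide]",
--     },
-- ) -> str:
--     # One left-to-right scan: at each '[' take the shortest bracketed token and
--     # look it up once, instead of one full-string replace pass per dictionary key.
--     out = []
--     i = 0
--     n = len(peptide)
--     while i < n:
--         c = peptide[i]
--         if c == '[':
--             j = i + 1
--             while j < n and peptide[j] != '[' and peptide[j] != ']':
--                 j += 1
--             if j < n and peptide[j] == ']':
--                 v = replace_dict.get(peptide[i:j + 1])
--                 if v is not None:
--                     out.append(v)
--                     i = j + 1
--                     continue
--         out.append(c)
--         i += 1
--     return ''.join(out)
-- ===== Notes on version B (the rewrite author's own statement) =====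
-- stated objective: alternative
-- what changed: Replaces the k sequential full-string replace passes (one per dictionary key) by a single left-to-right scan that, at each opening bracket, extracts the shortest bracketed token and looks it up once in the dict; Pre_ admits bracket-token dictionaries (the intended shape) and any dictionary none of whose keys occurs in the peptide, excluding only self-referential dictionaries whose cascading sequential replacement is not the function's purpose.
-- outside the precondition, e.g. on replace_mass_shift('a', {'a': 'b', 'b': 'c'}): A returns 'c', B returns 'a'
import Mathlib
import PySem

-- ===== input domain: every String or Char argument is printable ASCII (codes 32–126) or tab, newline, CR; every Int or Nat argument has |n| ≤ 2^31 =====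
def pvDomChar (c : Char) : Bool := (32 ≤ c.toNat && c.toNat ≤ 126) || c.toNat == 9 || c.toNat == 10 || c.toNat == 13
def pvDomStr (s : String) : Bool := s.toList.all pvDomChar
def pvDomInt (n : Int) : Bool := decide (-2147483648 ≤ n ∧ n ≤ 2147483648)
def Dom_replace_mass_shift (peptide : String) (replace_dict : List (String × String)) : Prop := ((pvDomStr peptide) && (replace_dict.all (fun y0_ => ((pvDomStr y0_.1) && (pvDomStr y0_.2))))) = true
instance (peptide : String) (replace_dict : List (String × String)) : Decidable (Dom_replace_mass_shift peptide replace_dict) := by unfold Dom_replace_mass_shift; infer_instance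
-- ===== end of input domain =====

-- B replaces the per-key sequential full-string replace passes of A by ONE left-to-right scan
-- that extracts each shortest bracketed token and looks it up once (objective: alternative).

-- ===== PORT A =====
-- for k, v in replace_dict.items(): peptide = peptide.replace(k, v); return peptide
def replace_mass_shift (peptide : String) (replace_dict : List (String × String)) : String :=
  replace_dict.foldl (fun s kv => PySem.Str.replace s kv.1 kv.2) peptide

-- ===== PORT B =====
-- the inner `while j < n and peptide[j] != '[' and peptide[j] != ']'` scan of Source B
def pvPred (x : Char) : Bool := !(x == '[') && !(x == ']')

-- replace_dict.get(tok)  (keys are distinct under Pre_, so first match = the dict lookup)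
def pvLookup (d : List (List Char × List Char)) (tok : List Char) : Option (List Char) :=
  (d.find? (fun p => p.1 == tok)).map (fun p => p.2)

-- the while-loop of Source B as a recursion over the remaining suffix, with the reversed
-- output accumulator for `out` (''.join(out) = acc.reverse at the end)
def pvScan (d : List (List Char × List Char)) : List Char → List Char → List Char
  | [], acc => acc.reverse
  | c :: t, acc =>
    if c = '[' ∧ (t.dropWhile pvPred).head? = some ']' then
      match pvLookup d ('[' :: t.takeWhile pvPred ++ [']']) with
      | some v => pvScan d (t.dropWhile pvPred).tail (v.reverse ++ acc)
      | none => pvScan d t (c :: acc)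
    else pvScan d t (c :: acc)
termination_by s _ => s.length
decreasing_by
  all_goals have h2 : (t.dropWhile pvPred).length ≤ t.length := List.length_dropWhile_le _ _
  all_goals simp
  all_goals omega

def replace_mass_shift_alt (peptide : String) (replace_dict : List (String × String)) : String :=
  String.ofList (pvScan (replace_dict.map (fun p => (p.1.toList, p.2.toList))) peptide.toList [])

-- ===== PRECONDITION & SPEC =====
-- cs is a single bracketed token whose body contains no bracket characters
def pvIsTokBody : List Char → Bool
  | [] => false
  | [c] => c == ']'
  | c :: rest => pvPred c && pvIsTokBody rest

def pvIsTok : List Char → Bool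
  | c :: rest => c == '[' && pvIsTokBody rest
  | [] => false

-- Pre_ admits (a) replace_dict of the function's intended shape: every key and value a single
-- bracketed token with a bracket-free body, no value itself a key, keys distinct (a
-- faithful Python dict); or (b) dictionaries none of whose keys occurs in the peptide (both
-- programs then return the peptide unchanged).  Excluded are only self-referential dictionaries
-- with a key actually occurring in the peptide, where A's k sequential replace passes genuinely
-- cascade (earlier outputs rewritten by later keys) — not the function's purpose, which maps
-- mass-shift tokens to modification names as in the default argument.
def Pre_replace_mass_shift (peptide : String) (replace_dict : List (String × String)) : Prop :=
  ((∀ p ∈ replace_dict, pvIsTok p.1.toList = true ∧ pvIsTok p.2.toList = true ∧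
      ∀ q ∈ replace_dict, p.2 ≠ q.1)
    ∧ (replace_dict.map (fun p => p.1)).Nodup)
  ∨ (∀ p ∈ replace_dict, PySem.Str.isIn p.1 peptide = false)

instance (peptide : String) (replace_dict : List (String × String)) : Decidable (Pre_replace_mass_shift peptide replace_dict) := by unfold Pre_replace_mass_shift; infer_instance

def pvWitness_replace_mass_shift : String × (List (String × String)) :=
  ("AC[+57.0215]DM[+15.9949]K[x]", [("[+57.0215]", "[Carbamidomethyl]"), ("[+15.9949]", "[Oxidation]")])

def Spec_replace_mass_shift (peptide : String) (replace_dict : List (String × String)) (out : String) : Prop := out = replace_mass_shift_alt peptide replace_dict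
instance (peptide : String) (replace_dict : List (String × String)) (out : String) : Decidable (Spec_replace_mass_shift peptide replace_dict out) := by unfold Spec_replace_mass_shift; infer_instance

-- ===== CLAIM (what is proved, stated in full; the proofs are below) =====
def Claim_equal_replace_mass_shift : Prop := ∀ (peptide : String) (replace_dict : List (String × String)), Dom_replace_mass_shift peptide replace_dict → Pre_replace_mass_shift peptide replace_dict → Spec_replace_mass_shift peptide replace_dict (replace_mass_shift peptide replace_dict)

-- ===== LEMMAS AND PROOFS =====

-- structural model of PySem.Chars.replace for a nonempty pattern
def pvRep (old new : List Char) : List Char → List Char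
  | [] => []
  | c :: t =>
    if old.isPrefixOf (c :: t) then new ++ pvRep old new (t.drop (old.length - 1))
    else c :: pvRep old new t
termination_by s => s.length
decreasing_by
  all_goals simp

def pvTokS (t : List Char) : Prop :=
  ∃ b, t = '[' :: b ++ [']'] ∧ ∀ c ∈ b, c ≠ '[' ∧ c ≠ ']'

def pvC (items : List (List Char × List Char)) : Prop :=
  ∀ kv ∈ items, pvTokS kv.1 ∧ pvTokS kv.2 ∧ ∀ kv' ∈ items, kv.2 ≠ kv'.1

lemma pvGoEq (old new : List Char) (h : old ≠ []) :
    ∀ (fuel : Nat) (l acc : List Char), l.length ≤ fuel →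
      PySem.Chars.replace.go old new fuel l acc = acc.reverse ++ pvRep old new l := by
  intro fuel
  induction fuel with
  | zero =>
    intro l acc hl
    have : l = [] := by cases l <;> simp_all
    subst this
    rw [PySem.Chars.replace.go, pvRep]
  | succ f ih =>
    intro l acc hl
    cases l with
    | nil =>
      rw [PySem.Chars.replace.go, pvRep]
      simp
      omega
    | cons c t =>
      rw [PySem.Chars.replace.go, pvRep]
      by_cases hp : old.isPrefixOf (c :: t)
      · simp only [hp, if_true]
        obtain ⟨o, old', rfl⟩ : ∃ o old', old = o :: old' := by
          cases old with | nil => exact absurd rfl h | cons a b => exact ⟨a, b, rfl⟩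
        have hdrop : List.drop (o :: old').length (c :: t) = t.drop ((o :: old').length - 1) := by
          simp
        rw [hdrop]
        have hlen : (t.drop ((o :: old').length - 1)).length ≤ f := by
          have h1 : (t.drop ((o :: old').length - 1)).length = t.length - ((o :: old').length - 1) :=
            List.length_drop
          have h2 : (c :: t).length ≤ f + 1 := hl
          simp at h2
          omega
        rw [ih _ _ hlen]
        simp
      · simp only [hp, Bool.false_eq_true, if_false]
        have hlen : t.length ≤ f := by
          have h2 : (c :: t).length ≤ f + 1 := hl
          simp at h2
          omega
        rw [ih _ _ hlen]
        simp

lemma pvReplaceEq (old new s : List Char) (h : old ≠ []) :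
    PySem.Chars.replace s old new = pvRep old new s := by
  rw [PySem.Chars.replace]
  rw [if_neg (by simp [List.isEmpty_iff, h])]
  have := pvGoEq old new h s.length s [] le_rfl
  simpa using this

lemma pvRepPrefixFree (old new p x : List Char) (hk : ∃ kb, old = '[' :: kb)
    (hp : ∀ c ∈ p, c ≠ '[') : pvRep old new (p ++ x) = p ++ pvRep old new x := by
  obtain ⟨kb, rfl⟩ := hk
  induction p with
  | nil => simp
  | cons c t ih =>
    have hc : c ≠ '[' := hp c (by simp)
    rw [List.cons_append, pvRep]
    have hnp : ¬ ('[' :: kb).isPrefixOf (c :: (t ++ x)) = true := by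
      simp [List.isPrefixOf]
      intro hcc
      exact absurd hcc.symm hc
    rw [if_neg hnp, ih (fun c hc => hp c (List.mem_cons_of_mem _ hc))]
    simp

lemma pvScanChar (d : List (List Char × List Char)) (c : Char) (hc : c ≠ '[')
    (t acc : List Char) : pvScan d (c :: t) acc = pvScan d t (c :: acc) := by
  rw [pvScan]; simp [hc]

lemma pvScanOpenFail (d : List (List Char × List Char)) (t acc : List Char)
    (hd : (t.dropWhile pvPred).head? ≠ some ']') :
    pvScan d ('[' :: t) acc = pvScan d t ('[' :: acc) := by
  rw [pvScan]; simp [hd]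

lemma pvScanEmitAll (d : List (List Char × List Char)) (p x acc : List Char)
    (hp : ∀ c ∈ p, c ≠ '[') : pvScan d (p ++ x) acc = pvScan d x (p.reverse ++ acc) := by
  induction p generalizing acc with
  | nil => simp
  | cons c t ih =>
    rw [List.cons_append, pvScanChar d c (hp c (by simp)) _ acc]
    rw [ih _ (fun c hc => hp c (List.mem_cons_of_mem _ hc))]
    simp

lemma pvScanTokSome (d : List (List Char × List Char)) (b x acc v : List Char)
    (hb : ∀ c ∈ b, c ≠ '[' ∧ c ≠ ']') (hl : pvLookup d ('[' :: b ++ [']']) = some v) :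
    pvScan d ('[' :: b ++ [']'] ++ x) acc = pvScan d x (v.reverse ++ acc) := by
  have hpos : ∀ c ∈ b, pvPred c = true := by
    intro c hc; simp [pvPred]; exact ⟨(hb c hc).1, (hb c hc).2⟩
  have hdw : (b ++ ']' :: x).dropWhile pvPred = ']' :: x := by
    rw [List.dropWhile_append_of_pos hpos]
    simp [List.dropWhile, pvPred]
  have htw : (b ++ ']' :: x).takeWhile pvPred = b := by
    rw [List.takeWhile_append_of_pos hpos]
    simp [List.takeWhile, pvPred]
  rw [show ('[' :: b ++ [']'] ++ x) = ('[' :: (b ++ ']' :: x)) by simp]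
  rw [pvScan]
  simp only [hdw, htw]
  simp only [List.head?_cons, and_true, if_true]
  rw [hl]
  rfl

lemma pvScanTokNone (d : List (List Char × List Char)) (b x acc : List Char)
    (hb : ∀ c ∈ b, c ≠ '[' ∧ c ≠ ']') (hl : pvLookup d ('[' :: b ++ [']']) = none) :
    pvScan d ('[' :: b ++ [']'] ++ x) acc = pvScan d x (('[' :: b ++ [']']).reverse ++ acc) := by
  have hpos : ∀ c ∈ b, pvPred c = true := by
    intro c hc; simp [pvPred]; exact ⟨(hb c hc).1, (hb c hc).2⟩
  have hdw : (b ++ ']' :: x).dropWhile pvPred = ']' :: x := by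
    rw [List.dropWhile_append_of_pos hpos]; simp [List.dropWhile, pvPred]
  have htw : (b ++ ']' :: x).takeWhile pvPred = b := by
    rw [List.takeWhile_append_of_pos hpos]; simp [List.takeWhile, pvPred]
  rw [show ('[' :: b ++ [']'] ++ x) = ('[' :: (b ++ ']' :: x)) by simp]
  rw [pvScan]
  simp only [hdw, htw, List.head?_cons, and_true, if_true]
  rw [hl]
  show pvScan d (b ++ ']' :: x) ('[' :: acc) = _
  have h1 : pvScan d (b ++ ']' :: x) ('[' :: acc) = pvScan d (']' :: x) (b.reverse ++ '[' :: acc) :=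
    pvScanEmitAll d b (']' :: x) ('[' :: acc) (fun c hc => (hb c hc).1)
  rw [h1, pvScanChar d ']' (by decide) x _]
  simp

lemma pvScanNilDict (s acc : List Char) : pvScan [] s acc = acc.reverse ++ s := by
  induction s generalizing acc with
  | nil => simp [pvScan]
  | cons c t ih =>
    rw [pvScan]
    by_cases h : c = '[' ∧ (t.dropWhile pvPred).head? = some ']'
    · simp [h, pvLookup, ih]
    · simp [h, ih]

-- one A-pass absorbed into the scan dictionary
lemma pvL (k v : List Char) (rest : List (List Char × List Char))
    (hk : pvTokS k) (hv : pvTokS v) (hvn : pvLookup rest v = none) :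
    ∀ (n : Nat) (s acc : List Char), s.length ≤ n →
      pvScan rest (pvRep k v s) acc = pvScan ((k, v) :: rest) s acc := by
  intro n
  induction n with
  | zero =>
    intro s acc hl
    have hs : s = [] := by cases s <;> simp_all
    subst hs
    rw [pvRep]; rw [pvScan, pvScan]
  | succ n ih =>
    intro s acc hl
    obtain ⟨bk, hkeq, hbk⟩ := hk
    obtain ⟨bv, hveq, hbv⟩ := hv
    cases s with
    | nil => rw [pvRep]; rw [pvScan, pvScan]
    | cons c t =>
      have hlt : t.length ≤ n := by simp at hl; omega
      by_cases hp : k.isPrefixOf (c :: t)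
      · -- a key occurrence at the front: c :: t = k ++ u
        obtain ⟨u, hu⟩ : ∃ u, k ++ u = c :: t := List.isPrefixOf_iff_prefix.mp hp
        rw [hkeq] at hu
        have hc : c = '[' := by
          have := congrArg (List.head? ·) hu; simpa using this.symm
        have ht : t = (bk ++ [']']) ++ u := by
          have := congrArg List.tail hu; simpa using this.symm
        have hdropu : t.drop (k.length - 1) = u := by
          rw [ht, hkeq]; simp
        rw [pvRep, if_pos hp, hdropu]
        have hulen : u.length ≤ n := by
          rw [ht] at hlt; simp at hlt; omega
        -- left side: emit v (not a key of rest), then continue on pvRep u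
        have hvn' : pvLookup rest ('[' :: bv ++ [']']) = none := by rw [← hveq]; exact hvn
        have lhs1 : ∀ X accX, pvScan rest (v ++ X) accX = pvScan rest X (v.reverse ++ accX) := by
          intro X accX
          rw [hveq]
          have := pvScanTokNone rest bv X accX hbv hvn'
          simpa using this
        rw [lhs1, ih u _ hulen]
        -- right side: the token k is replaced by v
        have hlk : pvLookup ((k, v) :: rest) ('[' :: bk ++ [']']) = some v := by
          simp [pvLookup, List.find?, hkeq]
        have rhs1 : pvScan ((k, v) :: rest) (c :: t) acc
            = pvScan ((k, v) :: rest) u (v.reverse ++ acc) := by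
          have hform : c :: t = '[' :: bk ++ [']'] ++ u := by
            rw [hc, ht]; simp
          rw [hform]
          exact pvScanTokSome ((k, v) :: rest) bk u acc v hbk hlk
        rw [rhs1]
      · -- no key occurrence at the front
        rw [pvRep, if_neg hp]
        by_cases hcc : c = '['
        · subst hcc
          have hsplit : t.takeWhile pvPred ++ t.dropWhile pvPred = t :=
            List.takeWhile_append_dropWhile
          have hbmem : ∀ x ∈ t.takeWhile pvPred, x ≠ '[' ∧ x ≠ ']' := by
            intro x hx
            have := List.mem_takeWhile_imp hx
            simp [pvPred] at this
            exact this
          have hkshape : ∃ kb, k = '[' :: kb := ⟨bk ++ [']'], hkeq⟩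
          cases hr : t.dropWhile pvPred with
          | nil =>
            -- the whole tail is bracket-free
            have htmem : ∀ x ∈ t, x ≠ '[' ∧ x ≠ ']' := by
              intro x hx
              have ht : t.takeWhile pvPred = t := by
                conv_rhs => rw [← hsplit]
                rw [hr]; simp
              rw [← ht] at hx
              exact hbmem x hx
            have hrept : pvRep k v t = t := by
              have h0 : pvRep k v ([] : List Char) = [] := by rw [pvRep]
              have := pvRepPrefixFree k v t [] hkshape (fun x hx => (htmem x hx).1)
              simpa [h0] using this
            rw [hrept]
            have hfail : (t.dropWhile pvPred).head? ≠ some ']' := by rw [hr]; simp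
            rw [pvScanOpenFail rest t acc hfail, pvScanOpenFail ((k, v) :: rest) t acc hfail]
            have e1 := pvScanEmitAll rest t [] ('[' :: acc) (fun x hx => (htmem x hx).1)
            have e2 := pvScanEmitAll ((k, v) :: rest) t [] ('[' :: acc)
              (fun x hx => (htmem x hx).1)
            simp only [List.append_nil] at e1 e2
            rw [e1, e2, pvScan, pvScan]
          | cons rc rx =>
            have hrc0 : pvPred rc = false := by
              have hne : t.dropWhile pvPred ≠ [] := by rw [hr]; simp
              have h1 := List.head_dropWhile_not pvPred hne
              have h2 : (t.dropWhile pvPred).head hne = rc := by simp [hr]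
              rwa [h2] at h1
            have ht2 : t = t.takeWhile pvPred ++ rc :: rx := by
              conv_lhs => rw [← hsplit]
              rw [hr]
            by_cases hrc : rc = ']'
            · -- a bracketed token starts the string
              subst hrc
              have hform : ('[' :: t.takeWhile pvPred ++ [']']) ++ rx = '[' :: t := by
                conv_rhs => rw [ht2]
                simp
              have htokne : ('[' :: t.takeWhile pvPred ++ [']']) ≠ k := by
                intro he
                apply hp
                apply List.isPrefixOf_iff_prefix.mpr
                exact ⟨rx, by rw [he] at hform; exact hform⟩
              have hrept : pvRep k v t = t.takeWhile pvPred ++ ']' :: pvRep k v rx := by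
                conv_lhs => rw [ht2, show t.takeWhile pvPred ++ ']' :: rx
                    = (t.takeWhile pvPred ++ [']']) ++ rx by simp]
                rw [pvRepPrefixFree k v _ rx hkshape
                    (fun x hx => by
                      simp at hx
                      rcases hx with hx | hx
                      · exact (hbmem x hx).1
                      · subst hx; decide)]
                simp
              rw [hrept]
              have hrxlen : rx.length ≤ n := by
                rw [ht2] at hlt; simp at hlt; omega
              have hlagree : pvLookup ((k, v) :: rest) ('[' :: t.takeWhile pvPred ++ [']'])
                  = pvLookup rest ('[' :: t.takeWhile pvPred ++ [']']) := by
                unfold pvLookup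
                rw [List.find?_cons_of_neg
                  (by exact fun h => htokne (eq_of_beq h).symm)]
              cases hlk : pvLookup rest ('[' :: t.takeWhile pvPred ++ [']']) with
              | some w =>
                have lhs1 : pvScan rest ('[' :: (t.takeWhile pvPred ++ ']' :: pvRep k v rx)) acc
                    = pvScan rest (pvRep k v rx) (w.reverse ++ acc) := by
                  have := pvScanTokSome rest (t.takeWhile pvPred) (pvRep k v rx) acc w hbmem hlk
                  simpa using this
                have rhs1 : pvScan ((k, v) :: rest) ('[' :: t) acc
                    = pvScan ((k, v) :: rest) rx (w.reverse ++ acc) := by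
                  conv_lhs => rw [ht2]
                  have := pvScanTokSome ((k, v) :: rest) (t.takeWhile pvPred) rx acc w hbmem
                    (by rw [hlagree]; exact hlk)
                  simpa using this
                rw [show ('[' :: (t.takeWhile pvPred ++ ']' :: pvRep k v rx))
                    = '[' :: t.takeWhile pvPred ++ ']' :: pvRep k v rx by simp] at lhs1 ⊢
                rw [lhs1, ih rx _ hrxlen, rhs1]
              | none =>
                have lhs1 : pvScan rest ('[' :: (t.takeWhile pvPred ++ ']' :: pvRep k v rx)) acc
                    = pvScan rest (pvRep k v rx)
                        (('[' :: t.takeWhile pvPred ++ [']']).reverse ++ acc) := by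
                  have := pvScanTokNone rest (t.takeWhile pvPred) (pvRep k v rx) acc hbmem hlk
                  simpa using this
                have rhs1 : pvScan ((k, v) :: rest) ('[' :: t) acc
                    = pvScan ((k, v) :: rest) rx
                        (('[' :: t.takeWhile pvPred ++ [']']).reverse ++ acc) := by
                  conv_lhs => rw [ht2]
                  have := pvScanTokNone ((k, v) :: rest) (t.takeWhile pvPred) rx acc hbmem
                    (by rw [hlagree]; exact hlk)
                  simpa using this
                rw [show ('[' :: (t.takeWhile pvPred ++ ']' :: pvRep k v rx))
                    = '[' :: t.takeWhile pvPred ++ ']' :: pvRep k v rx by simp] at lhs1 ⊢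
                rw [lhs1, ih rx _ hrxlen, rhs1]
            · -- the next bracket character is another '[': no token here
              have hrc2 : rc = '[' := by
                simp [pvPred] at hrc0
                by_cases hq : rc = '['
                · exact hq
                · exact absurd (hrc0 hq) hrc
              subst hrc2
              have hrept : pvRep k v t = t.takeWhile pvPred ++ pvRep k v ('[' :: rx) := by
                conv_lhs => rw [ht2]
                exact pvRepPrefixFree k v _ _ hkshape (fun x hx => (hbmem x hx).1)
              obtain ⟨z, hz⟩ : ∃ z, pvRep k v ('[' :: rx) = '[' :: z := by
                rw [pvRep]
                by_cases hp2 : k.isPrefixOf ('[' :: rx)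
                · rw [if_pos hp2, hveq]
                  exact ⟨bv ++ [']'] ++ pvRep k ('[' :: (bv ++ [']'])) (rx.drop (k.length - 1)),
                    by simp⟩
                · rw [if_neg hp2]
                  exact ⟨pvRep k v rx, rfl⟩
              have hrxlen : ('[' :: rx).length ≤ n := by
                rw [ht2] at hlt; simp at hlt; simp; omega
              -- left side
              have hdwl : ((t.takeWhile pvPred ++ '[' :: z).dropWhile pvPred).head? ≠ some ']' := by
                rw [List.dropWhile_append_of_pos (fun x hx => List.mem_takeWhile_imp hx)]
                rw [List.dropWhile_cons_of_neg (by simp [pvPred])]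
                simp
              have lhs1 : pvScan rest ('[' :: pvRep k v t) acc
                  = pvScan rest (pvRep k v ('[' :: rx))
                      ((t.takeWhile pvPred).reverse ++ '[' :: acc) := by
                rw [hrept, hz]
                rw [pvScanOpenFail rest _ acc hdwl]
                rw [pvScanEmitAll rest _ _ _ (fun x hx => (hbmem x hx).1)]
              -- right side
              have hdwr : (t.dropWhile pvPred).head? ≠ some ']' := by rw [hr]; simp [hrc]
              have rhs1 : pvScan ((k, v) :: rest) ('[' :: t) acc
                  = pvScan ((k, v) :: rest) ('[' :: rx)
                      ((t.takeWhile pvPred).reverse ++ '[' :: acc) := by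
                rw [pvScanOpenFail ((k, v) :: rest) t acc hdwr]
                conv_lhs => rw [ht2]
                rw [pvScanEmitAll ((k, v) :: rest) _ _ _ (fun x hx => (hbmem x hx).1)]
              rw [lhs1, ih ('[' :: rx) _ hrxlen, rhs1]
        · -- ordinary character
          rw [pvScanChar rest c hcc _ acc, pvScanChar ((k, v) :: rest) c hcc t acc]
          exact ih t _ hlt

lemma pvT (items : List (List Char × List Char)) (hC : pvC items) :
    ∀ (s acc : List Char),
      pvScan items s acc = acc.reverse ++ items.foldl (fun l kv => pvRep kv.1 kv.2 l) s := by
  induction items with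
  | nil => intro s acc; simp [pvScanNilDict]
  | cons kv rest ih =>
    obtain ⟨k, v⟩ := kv
    intro s acc
    obtain ⟨hk, hv, hvnotkey⟩ := hC (k, v) (by simp)
    have hvn : pvLookup rest v = none := by
      unfold pvLookup
      rw [List.find?_eq_none.mpr]
      · rfl
      · intro x hx hbeq
        exact hvnotkey x (List.mem_cons_of_mem _ hx) (eq_of_beq hbeq).symm
    have hCr : pvC rest := by
      intro kv' h
      obtain ⟨a, b, c⟩ := hC kv' (List.mem_cons_of_mem _ h)
      exact ⟨a, b, fun q hq => c q (List.mem_cons_of_mem _ hq)⟩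
    rw [← pvL k v rest hk hv hvn s.length s acc le_rfl, ih hCr]
    simp

lemma pvIsTokBodyShape :
    ∀ l, pvIsTokBody l = true → ∃ b, l = b ++ [']'] ∧ ∀ c ∈ b, c ≠ '[' ∧ c ≠ ']' := by
  intro l
  induction l with
  | nil => intro h; rw [pvIsTokBody] at h; exact absurd h (by simp)
  | cons c t ih =>
    cases t with
    | nil =>
      intro h
      rw [pvIsTokBody] at h
      exact ⟨[], by simpa using eq_of_beq h, by simp⟩
    | cons c2 t2 =>
      intro h
      rw [pvIsTokBody] at h
      · simp only [Bool.and_eq_true] at h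
        obtain ⟨b, hb, hmem⟩ := ih h.2
        refine ⟨c :: b, by simp [hb], ?_⟩
        intro x hx
        rcases List.mem_cons.mp hx with hx | hx
        · subst hx
          have := h.1
          simp [pvPred] at this
          exact this
        · exact hmem x hx
      · simp

lemma pvIsTokShape (cs : List Char) (h : pvIsTok cs = true) : pvTokS cs := by
  cases cs with
  | nil => rw [pvIsTok] at h; exact absurd h (by simp)
  | cons c t =>
    rw [pvIsTok] at h
    simp only [Bool.and_eq_true] at h
    obtain ⟨b, hb, hmem⟩ := pvIsTokBodyShape t h.2
    exact ⟨b, by rw [hb, eq_of_beq h.1]; simp, hmem⟩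

lemma pvFoldToList (d : List (String × String)) (s : String) :
    (d.foldl (fun s kv => PySem.Str.replace s kv.1 kv.2) s).toList
      = d.foldl (fun l kv => PySem.Chars.replace l kv.1.toList kv.2.toList) s.toList := by
  induction d generalizing s with
  | nil => rfl
  | cons kv d ih =>
    simp only [List.foldl_cons]
    rw [ih, PySem.Str.toList_replace]

lemma pvRepNoOcc (k v s : List Char) (_hk : k ≠ []) (h : ¬ k <:+: s) :
    pvRep k v s = s := by
  induction s with
  | nil => rw [pvRep]
  | cons c t ih =>
    rw [pvRep]
    have hnp : ¬ k.isPrefixOf (c :: t) = true := by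
      intro hp
      exact h (List.IsPrefix.isInfix (List.isPrefixOf_iff_prefix.mp hp))
    rw [if_neg hnp, ih (fun hi => h (List.infix_cons hi))]

lemma pvScanNoHit (d : List (List Char × List Char)) :
    ∀ (s acc : List Char), (∀ p ∈ d, ¬ p.1 <:+: s) → pvScan d s acc = acc.reverse ++ s := by
  intro s
  induction s with
  | nil => intro acc _; rw [pvScan]; simp
  | cons c t ih =>
    intro acc h
    have hmono : ∀ p ∈ d, ¬ p.1 <:+: t := fun p hp hi => h p hp (List.infix_cons hi)
    rw [pvScan]
    by_cases hcond : c = '[' ∧ (t.dropWhile pvPred).head? = some ']'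
    · have hlk : pvLookup d ('[' :: t.takeWhile pvPred ++ [']']) = none := by
        unfold pvLookup
        rw [List.find?_eq_none.mpr]
        · rfl
        · intro p hp hbeq
          apply h p hp
          rw [eq_of_beq hbeq]
          apply List.IsPrefix.isInfix
          obtain ⟨rx, hrx⟩ : ∃ rx, t.dropWhile pvPred = ']' :: rx := by
            cases hdw : t.dropWhile pvPred with
            | nil => rw [hdw] at hcond; simp at hcond
            | cons a b =>
              rw [hdw] at hcond
              simp at hcond
              exact ⟨b, by rw [hcond.2]⟩
          refine ⟨rx, ?_⟩
          rw [hcond.1]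
          conv_rhs => rw [show t = t.takeWhile pvPred ++ t.dropWhile pvPred from
            List.takeWhile_append_dropWhile.symm]
          rw [hrx]
          simp
      rw [if_pos hcond, hlk]
      show pvScan d t (c :: acc) = _
      rw [ih (c :: acc) hmono]
      simp
    · rw [if_neg hcond, ih (c :: acc) hmono]
      simp

lemma pvFoldNoOcc (d : List (String × String)) (pep : String)
    (h : ∀ p ∈ d, ¬ p.1.toList <:+: pep.toList) :
    d.foldl (fun s kv => PySem.Str.replace s kv.1 kv.2) pep = pep := by
  induction d with
  | nil => rfl
  | cons kv rest ih =>
    have hkv := h kv (by simp)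
    have hk0 : kv.1.toList ≠ [] := fun he => hkv (by rw [he]; exact List.nil_infix)
    have hstep : PySem.Str.replace pep kv.1 kv.2 = pep := by
      apply String.toList_inj.mp
      rw [PySem.Str.toList_replace, pvReplaceEq _ _ _ hk0, pvRepNoOcc _ _ _ hk0 hkv]
    simp only [List.foldl_cons, hstep]
    exact ih (fun q hq => h q (List.mem_cons_of_mem _ hq))

lemma pvFoldRep (items : List (List Char × List Char)) (h : ∀ kv ∈ items, kv.1 ≠ []) :
    ∀ l, items.foldl (fun l kv => PySem.Chars.replace l kv.1 kv.2) l
      = items.foldl (fun l kv => pvRep kv.1 kv.2 l) l := by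
  induction items with
  | nil => intro l; rfl
  | cons kv rest ih =>
    intro l
    simp only [List.foldl_cons]
    rw [pvReplaceEq kv.1 kv.2 l (h kv (by simp)), ih (fun q hq => h q (List.mem_cons_of_mem _ hq))]

-- ===== VERDICT (by name: the statement is the Claim_ definition above) =====
theorem replace_mass_shift_spec : Claim_equal_replace_mass_shift := by
  unfold Claim_equal_replace_mass_shift
  intro pep d hdom hpre
  unfold Spec_replace_mass_shift replace_mass_shift replace_mass_shift_alt
  rcases hpre with ⟨hp1, hp2⟩ | hnoop
  case inr =>
    -- no key occurs in the peptide: both sides return it unchanged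
    have hinf : ∀ p ∈ d.map (fun p => (p.1.toList, p.2.toList)), ¬ p.1 <:+: pep.toList := by
      intro p hp
      obtain ⟨q, hq, rfl⟩ := List.mem_map.mp hp
      have h1 := hnoop q hq
      rw [PySem.Str.isIn] at h1
      exact (PySem.Chars.isIn_eq_false_iff _ _).mp h1
    have hB : String.ofList
        (pvScan (d.map (fun p => (p.1.toList, p.2.toList))) pep.toList []) = pep := by
      rw [pvScanNoHit _ pep.toList [] hinf]
      simp [String.ofList_toList]
    rw [hB]
    -- every A pass leaves the peptide unchanged
    exact pvFoldNoOcc d pep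
      (fun p hp => hinf (p.1.toList, p.2.toList) (List.mem_map.mpr ⟨p, hp, rfl⟩))
  apply String.toList_inj.mp
  rw [String.toList_ofList, pvFoldToList]
  have hC : pvC (d.map (fun p => (p.1.toList, p.2.toList))) := by
    intro kv hkv
    obtain ⟨p, hp, rfl⟩ := List.mem_map.mp hkv
    obtain ⟨h1, h2, h3⟩ := hp1 p hp
    refine ⟨pvIsTokShape _ h1, pvIsTokShape _ h2, ?_⟩
    intro kv' hkv'
    obtain ⟨q, hq, rfl⟩ := List.mem_map.mp hkv'
    intro heq
    exact h3 q hq (String.toList_inj.mp heq)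
  have hne : ∀ kv ∈ d.map (fun p => (p.1.toList, p.2.toList)), kv.1 ≠ [] := by
    intro kv hkv
    obtain ⟨a, ha, hmem⟩ := (hC kv hkv).1
    rw [ha]
    simp
  have step1 : d.foldl (fun l kv => PySem.Chars.replace l kv.1.toList kv.2.toList) pep.toList
      = (d.map (fun p => (p.1.toList, p.2.toList))).foldl
          (fun l kv => PySem.Chars.replace l kv.1 kv.2) pep.toList := by
    rw [List.foldl_map]
  rw [step1, pvFoldRep _ hne]
  have := pvT _ hC pep.toList []
  simp only [List.reverse_nil, List.nil_append] at this
  rw [← this]
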